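-- pv_equiv track=rewrite | github.com/sanityseeker/padel-amistoso | backend/tournaments/pairing.py | _effective_first_round_pairs
-- ===== SOURCE A (Python) =====
-- def _effective_first_round_pairs(n: int) -> list[tuple[int, int]]:
--     """Return all seed pairs that are guaranteed to meet in their first actual match.
--
--     Unlike a simple round-1 check, this accounts for byes: when two seeds both
--     receive byes in round 1 they will deterministically meet in round 2 (their
--     real first match). This function walks the bracket forward, propagating bye
--     recipients, and records every pair of seeds whose first encounter has no TBD
--     slot — i.e. every match whose both participants are completely determined by
--     the initial seeding.
--
--     ``n`` is the number of real teams (byes fill the remaining bracket slots).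
--     """
--     bracket_size = 1 << (max(n, 1) - 1).bit_length()
--
--     def _seed_order(k: int) -> list[int]:
--         if k == 1:
--             return [0]
--         prev = _seed_order(k // 2)
--         result: list[int] = []
--         for s in prev:
--             result.append(s)
--             result.append(k - 1 - s)
--         return result
--
--     order = _seed_order(bracket_size)
--     # positions[i] = seed index for that bracket slot, None = bye
--     positions: list[int | None] = [order[i] if order[i] < n else None for i in range(bracket_size)]
--
--     pairs: list[tuple[int, int]] = []
--     num_rounds = bracket_size.bit_length() - 1
--
--     for _ in range(num_rounds):
--         next_pos: list[int | None] = []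
--         for p in range(len(positions) // 2):
--             a, b = positions[2 * p], positions[2 * p + 1]
--             if a is not None and b is None:
--                 # a gets a bye, stays deterministic
--                 next_pos.append(a)
--             elif a is None and b is not None:
--                 # b gets a bye, stays deterministic
--                 next_pos.append(b)
--             elif a is None and b is None:
--                 next_pos.append(None)
--             else:
--                 # Both real seeds: their first actual match is this one
--                 pairs.append((min(a, b), max(a, b)))
--                 # Winner is TBD — propagate None
--                 next_pos.append(None)
--         positions = next_pos
--
--     return pairs
-- ===== SOURCE B (Python) =====
-- def _effective_first_round_pairs(n: int) -> list[tuple[int, int]]: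
--     """Divide-and-conquer over the bracket tree instead of round-by-round simulation."""
--     bracket_size = 1 << (max(n, 1) - 1).bit_length()
--
--     def _seed_order(k: int) -> list[int]:
--         if k == 1:
--             return [0]
--         return [x for s in _seed_order(k // 2) for x in (s, k - 1 - s)]
--
--     positions = [s if s < n else None for s in _seed_order(bracket_size)]
--
--     def solve(slots):
--         # returns (determined seed or None, per-round match lists, deepest last)
--         if len(slots) == 1:
--             return slots[0], []
--         h = len(slots) // 2
--         da, ra = solve(slots[:h])
--         db, rb = solve(slots[h:])
--         if da is not None and db is not None:
--             det, last = None, [(min(da, db), max(da, db))]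
--         else:
--             det, last = (da if da is not None else db), []
--         return det, [la + lb for la, lb in zip(ra, rb)] + [last]
--
--     _, rounds = solve(positions)
--     return [p for rnd in rounds for p in rnd]
-- ===== Notes on version B (the rewrite author's own statement) =====
-- stated objective: alternative
-- what changed: Replaced A's round-by-round simulation over the flat positions array with a divide-and-conquer recursion over the bracket tree that returns (determined-seed, per-round match lists) per subtree and merges sibling rounds level by level before flattening round-major.
import Mathlib
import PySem

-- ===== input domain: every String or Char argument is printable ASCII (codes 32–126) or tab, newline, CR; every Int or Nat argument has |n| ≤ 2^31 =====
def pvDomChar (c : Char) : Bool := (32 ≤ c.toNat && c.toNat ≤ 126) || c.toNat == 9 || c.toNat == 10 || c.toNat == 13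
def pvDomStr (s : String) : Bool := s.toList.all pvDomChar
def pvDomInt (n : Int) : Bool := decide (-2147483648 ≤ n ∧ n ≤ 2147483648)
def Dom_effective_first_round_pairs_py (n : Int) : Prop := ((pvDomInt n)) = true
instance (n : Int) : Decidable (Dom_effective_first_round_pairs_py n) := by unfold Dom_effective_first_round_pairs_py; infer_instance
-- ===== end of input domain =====

-- B replaces A's round-by-round simulation of the flat bracket array with a
-- divide-and-conquer recursion over the bracket tree (objective: alternative, same cost).

-- Python int.bit_length for naturals (exact: 0 → 0, else ⌊log2⌋+1), shared by both ports
def bitLen : Nat → Nat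
  | 0 => 0
  | n + 1 => bitLen ((n + 1) / 2) + 1

-- _seed_order, shared helper (identical in both Pythons)
def seedOrderR (k : Nat) : List Nat :=
  if k ≤ 1 then [0]
  else (seedOrderR (k / 2)).flatMap (fun s => [s, k - 1 - s])
termination_by k
decreasing_by omega

-- the seeded positions list (both Pythons build it identically from _seed_order)
def positionsFor (n : Int) (bs : Nat) : List (Option Int) :=
  (seedOrderR bs).map (fun s => if (s : Int) < n then some (s : Int) else none)

-- ===== PORT A =====
-- one round of A's inner loop: walks the slots two at a time, in order
def stepA : List (Option Int) → List (Option Int) × List (Int × Int)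
  | a :: b :: rest =>
    let r := stepA rest
    match a, b with
    | some x, none   => (some x :: r.1, r.2)
    | none,   some y => (some y :: r.1, r.2)
    | none,   none   => (none :: r.1, r.2)
    | some x, some y => (none :: r.1, (min x y, max x y) :: r.2)
  | _ => ([], [])

-- A's outer `for _ in range(num_rounds)` loop with its (positions, pairs) state
def runA : Nat → List (Option Int) → List (Int × Int) → List (Int × Int)
  | 0, _, pairs => pairs
  | k + 1, pos, pairs =>
    let r := stepA pos
    runA k r.1 (pairs ++ r.2)

def effective_first_round_pairs_py (n : Int) : List (Int × Int) :=
  let bracketSize := 1 <<< bitLen (max n 1 - 1).toNat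
  let positions := positionsFor n bracketSize
  runA (bitLen bracketSize - 1) positions []

-- ===== PORT B =====
-- recursive solve over the bracket tree: (determined seed?, per-round match lists)
def solveB : List (Option Int) → Option Int × List (List (Int × Int))
  | [] => (none, [])
  | [x] => (x, [])
  | a :: b :: t =>
    let h := (a :: b :: t).length / 2
    let L := solveB ((a :: b :: t).take h)
    let R := solveB ((a :: b :: t).drop h)
    let detLast : Option Int × List (Int × Int) :=
      match L.1, R.1 with
      | some x, some y => (none, [(min x y, max x y)])
      | some x, none   => (some x, [])
      | none,   q      => (q, [])
    (detLast.1, List.zipWith (· ++ ·) L.2 R.2 ++ [detLast.2])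
termination_by l => l.length
decreasing_by all_goals simp [List.length_take, List.length_drop]; omega

def effective_first_round_pairs_py_alt (n : Int) : List (Int × Int) :=
  let bracketSize := 1 <<< bitLen (max n 1 - 1).toNat
  let positions := positionsFor n bracketSize
  ((solveB positions).2).flatten

-- ===== PRECONDITION & SPEC =====
def Spec_effective_first_round_pairs_py (n : Int) (out : List (Int × Int)) : Prop := out = effective_first_round_pairs_py_alt n
instance (n : Int) (out : List (Int × Int)) : Decidable (Spec_effective_first_round_pairs_py n out) := by unfold Spec_effective_first_round_pairs_py; infer_instance

-- ===== CLAIM (what is proved, stated in full; the proofs are below) =====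
def Claim_equal_effective_first_round_pairs_py : Prop := ∀ (n : Int), Dom_effective_first_round_pairs_py n → Spec_effective_first_round_pairs_py n (effective_first_round_pairs_py n)

-- ===== LEMMAS AND PROOFS =====

-- positions after k rounds of A's loop
def stateA : Nat → List (Option Int) → List (Option Int)
  | 0, l => l
  | k + 1, l => stateA k (stepA l).1

-- pairs of A's loop, grouped by round
def roundsA : Nat → List (Option Int) → List (List (Int × Int))
  | 0, _ => []
  | k + 1, l => (stepA l).2 :: roundsA k (stepA l).1

theorem runA_eq_flatten : ∀ (k : Nat) (l : List (Option Int)) (acc : List (Int × Int)),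
    runA k l acc = acc ++ (roundsA k l).flatten := by
  intro k
  induction k with
  | zero => intro l acc; simp [runA, roundsA]
  | succ k ih => intro l acc; simp [runA, roundsA, ih]

theorem stateA_succ : ∀ (k : Nat) (l : List (Option Int)),
    stateA (k + 1) l = (stepA (stateA k l)).1 := by
  intro k
  induction k with
  | zero => intro l; rfl
  | succ k ih => intro l; rw [show k+1+1 = (k+1)+1 from rfl]; simp only [stateA]; rw [← ih]; rfl

theorem roundsA_succ : ∀ (k : Nat) (l : List (Option Int)),
    roundsA (k + 1) l = roundsA k l ++ [(stepA (stateA k l)).2] := by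
  intro k
  induction k with
  | zero => intro l; rfl
  | succ k ih =>
    intro l
    show (stepA l).2 :: roundsA (k + 1) (stepA l).1 =
      ((stepA l).2 :: roundsA k (stepA l).1) ++ [(stepA (stateA (k + 1) l)).2]
    rw [ih]
    simp [stateA]

theorem stepA_length : ∀ (l : List (Option Int)), (stepA l).1.length = l.length / 2
  | [] => by simp [stepA]
  | [a] => by simp [stepA]
  | a :: b :: t => by
    have ih := stepA_length t
    cases a <;> cases b <;> simp [stepA, ih] <;> omega

theorem stepA_append : ∀ (l1 l2 : List (Option Int)), l1.length % 2 = 0 →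
    stepA (l1 ++ l2) = ((stepA l1).1 ++ (stepA l2).1, (stepA l1).2 ++ (stepA l2).2)
  | [], l2, _ => by simp [stepA]
  | [a], l2, h => by simp at h
  | a :: b :: t, l2, h => by
    have ih := stepA_append t l2 (by simp at h; omega)
    cases a <;> cases b <;> simp [stepA, ih]

theorem dist : ∀ (j k : Nat) (l1 l2 : List (Option Int)),
    l1.length = 2 ^ k → l2.length = 2 ^ k → j ≤ k →
    stateA j (l1 ++ l2) = stateA j l1 ++ stateA j l2 ∧
      roundsA j (l1 ++ l2) = List.zipWith (· ++ ·) (roundsA j l1) (roundsA j l2) := by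
  intro j
  induction j with
  | zero => intro k l1 l2 _ _ _; simp [stateA, roundsA]
  | succ j ih =>
    intro k l1 l2 h1 h2 hj
    obtain ⟨k', rfl⟩ : ∃ k', k = k' + 1 := ⟨k - 1, by omega⟩
    have hp : 2 ^ (k' + 1) = 2 * 2 ^ k' := by ring
    have hev : l1.length % 2 = 0 := by rw [h1, hp]; omega
    have hs := stepA_append l1 l2 hev
    have h1' : (stepA l1).1.length = 2 ^ k' := by rw [stepA_length, h1, hp]; omega
    have h2' : (stepA l2).1.length = 2 ^ k' := by rw [stepA_length, h2, hp]; omega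
    have := ih k' (stepA l1).1 (stepA l2).1 h1' h2' (by omega)
    constructor
    · simp only [stateA, hs]; exact this.1
    · simp only [roundsA, hs]; rw [this.2]; rfl

-- solveB unfolded on a list of length ≥ 2
theorem solveB_cons2 (a b : Option Int) (t : List (Option Int)) :
    solveB (a :: b :: t) =
      (let h := (a :: b :: t).length / 2
       let L := solveB ((a :: b :: t).take h)
       let R := solveB ((a :: b :: t).drop h)
       let detLast : Option Int × List (Int × Int) :=
         match L.1, R.1 with
         | some x, some y => (none, [(min x y, max x y)])
         | some x, none   => (some x, [])
         | none,   q      => (q, [])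
       (detLast.1, List.zipWith (· ++ ·) L.2 R.2 ++ [detLast.2])) := by
  rw [solveB]

theorem main_lemma : ∀ (k : Nat) (l : List (Option Int)), l.length = 2 ^ k →
    stateA k l = [(solveB l).1] ∧ roundsA k l = (solveB l).2 := by
  intro k
  induction k with
  | zero =>
    intro l hl
    match l, hl with
    | [x], _ => simp [stateA, roundsA, solveB]
  | succ k ih =>
    intro l hl
    have hp : 2 ^ (k + 1) = 2 * 2 ^ k := by ring
    have h1 : 1 ≤ 2 ^ k := Nat.one_le_two_pow
    have hlen2 : 2 ≤ l.length := by rw [hl, hp]; omega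
    obtain ⟨a, b, t, rfl⟩ : ∃ a b t, l = a :: b :: t := by
      match l, hlen2 with
      | a :: b :: t, _ => exact ⟨a, b, t, rfl⟩
    simp only [List.length_cons] at hl
    have hh : (t.length + 1 + 1) / 2 = 2 ^ k := by omega
    have ht : (List.take ((t.length + 1 + 1) / 2) (a :: b :: t)).length = 2 ^ k := by
      simp [List.length_take]; omega
    have hd : (List.drop ((t.length + 1 + 1) / 2) (a :: b :: t)).length = 2 ^ k := by
      simp [List.length_drop]; omega
    have ihL := ih _ ht
    have ihR := ih _ hd
    have hsplit : a :: b :: t =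
        List.take ((t.length + 1 + 1) / 2) (a :: b :: t) ++
          List.drop ((t.length + 1 + 1) / 2) (a :: b :: t) := by
      rw [List.take_append_drop]
    have hdist := dist k k _ _ ht hd (le_refl k)
    have hstate : stateA k (a :: b :: t) =
        [(solveB (List.take ((t.length + 1 + 1) / 2) (a :: b :: t))).1,
         (solveB (List.drop ((t.length + 1 + 1) / 2) (a :: b :: t))).1] := by
      conv_lhs => rw [hsplit]
      rw [hdist.1, ihL.1, ihR.1]; rfl
    have hrounds : roundsA k (a :: b :: t) =
        List.zipWith (· ++ ·) (solveB (List.take ((t.length + 1 + 1) / 2) (a :: b :: t))).2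
          (solveB (List.drop ((t.length + 1 + 1) / 2) (a :: b :: t))).2 := by
      conv_lhs => rw [hsplit]
      rw [hdist.2, ihL.2, ihR.2]
    rw [stateA_succ, roundsA_succ, hstate, hrounds, solveB_cons2]
    simp only [List.length_cons]
    cases (solveB (List.take ((t.length + 1 + 1) / 2) (a :: b :: t))).1 <;>
      cases (solveB (List.drop ((t.length + 1 + 1) / 2) (a :: b :: t))).1 <;>
        simp [stepA]

theorem seedOrderR_two_pow_length : ∀ (j : Nat), (seedOrderR (2 ^ j)).length = 2 ^ j := by
  intro j
  induction j with
  | zero => rw [seedOrderR]; simp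
  | succ j ih =>
    rw [seedOrderR]
    have hp : 2 ^ (j + 1) = 2 * 2 ^ j := by ring
    have hone : 1 ≤ 2 ^ j := Nat.one_le_two_pow
    have h1 : ¬ 2 ^ (j + 1) ≤ 1 := by omega
    have h2 : 2 ^ (j + 1) / 2 = 2 ^ j := by omega
    simp only [h1, if_false, h2, List.length_flatMap]
    simp [ih, pow_succ, Nat.mul_comm]

theorem bitLen_ne_zero (k : Nat) (h : k ≠ 0) : bitLen k = bitLen (k / 2) + 1 := by
  match k, h with
  | n + 1, _ => rw [bitLen]

theorem bitLen_two_pow (j : Nat) : bitLen (2 ^ j) = j + 1 := by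
  induction j with
  | zero =>
    rw [pow_zero, bitLen_ne_zero 1 (by omega)]
    norm_num
    rw [bitLen]
  | succ j ih =>
    rw [bitLen_ne_zero _ (by positivity)]
    have : 2 ^ (j + 1) / 2 = 2 ^ j := by rw [pow_succ]; omega
    rw [this, ih]

-- ===== VERDICT (by name: the statement is the Claim_ definition above) =====
theorem effective_first_round_pairs_py_spec : Claim_equal_effective_first_round_pairs_py := by
  intro n _
  unfold Spec_effective_first_round_pairs_py
  unfold effective_first_round_pairs_py effective_first_round_pairs_py_alt
  simp only []
  set j := bitLen (max n 1 - 1).toNat with hj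
  have hbs : 1 <<< j = 2 ^ j := by simp [Nat.shiftLeft_eq]
  have hlen : (positionsFor n (1 <<< j)).length = 2 ^ j := by
    rw [positionsFor, hbs]; simp [seedOrderR_two_pow_length]
  have hnr : bitLen (1 <<< j) - 1 = j := by rw [hbs, bitLen_two_pow]; omega
  have hmain := main_lemma j (positionsFor n (1 <<< j)) hlen
  rw [hnr, runA_eq_flatten, hmain.2]
  simp
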